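-- pv_equiv track=rewrite | github.com/YaninaK/predictive-maintenance | src/predictive_maintenance/data/resample_dataset.py | get_equipment_columns
-- ===== SOURCE A (Python) =====
-- def get_equipment_columns(cols: list) -> dict:
--     """
--     Selects columns related to particular equipment.
--     """
--     cols_dict = {}
--     for i in range(4, 10):
--         cols_dict[i] = [cols[0]]
--         cols_list = []
--         for j in cols[1:]:
--             if j[0] == str(i):
--                 cols_list.append(j)
--         cols_dict[i] = cols_dict[i] + sorted(cols_list)
--
--     return cols_dict
-- ===== SOURCE B (Python) =====
-- def get_equipment_columns(cols: list) -> dict: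
--     """
--     Selects columns related to particular equipment.
--     One pass over cols[1:] dispatching each column into its digit bucket,
--     instead of six rescans of the whole list.
--     """
--     head = cols[0]
--     b4, b5, b6, b7, b8, b9 = [], [], [], [], [], []
--     for j in cols[1:]:
--         c = j[0]
--         if c == '4':
--             b4.append(j)
--         elif c == '5':
--             b5.append(j)
--         elif c == '6':
--             b6.append(j)
--         elif c == '7':
--             b7.append(j)
--         elif c == '8':
--             b8.append(j)
--         elif c == '9':
--             b9.append(j)
--     return {i: [head] + sorted(b)
--             for i, b in zip(range(4, 10), (b4, b5, b6, b7, b8, b9))}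
-- ===== Notes on version B (the rewrite author's own statement) =====
-- stated objective: faster
-- what changed: Replaces the six full rescans of cols[1:] (one per digit 4-9) by a single bucketing pass that dispatches each column into its digit's accumulator, then builds the dict from the six buckets.
import Mathlib
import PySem

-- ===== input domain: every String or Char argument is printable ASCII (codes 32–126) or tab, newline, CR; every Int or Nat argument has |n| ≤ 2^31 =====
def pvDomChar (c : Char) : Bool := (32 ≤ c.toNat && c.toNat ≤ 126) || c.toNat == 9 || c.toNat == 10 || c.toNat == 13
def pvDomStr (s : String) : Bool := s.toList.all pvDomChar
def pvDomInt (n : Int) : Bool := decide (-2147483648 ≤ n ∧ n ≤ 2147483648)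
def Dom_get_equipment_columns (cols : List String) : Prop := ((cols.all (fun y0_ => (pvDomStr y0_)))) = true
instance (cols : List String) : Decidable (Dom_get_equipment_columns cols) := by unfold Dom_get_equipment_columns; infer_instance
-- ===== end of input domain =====

-- B makes one bucketing pass over cols[1:] instead of A's six rescans (one per digit 4–9).

-- ===== PORT A =====
def get_equipment_columns (cols : List String) : List (Int × List String) :=
  (((PySem.List.pyRange 4 10 1).foldl (fun (d : PySem.Dict Int (List String)) i =>
      let d := d.insert i [PySem.List.pyGetD cols 0 ""]
      let cols_list := (PySem.List.slice cols (some 1) none).foldl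
        (fun acc j =>
          if (PySem.Str.pyGet? j 0).map (fun c => String.singleton c) == some (PySem.Int.toStr i)
          then acc ++ [j] else acc) []
      d.insert i (d.getD i [] ++ PySem.List.sorted cols_list (fun x => x) false))
    PySem.Dict.empty)).items

-- ===== PORT B =====
-- B-side helper: the body of Source B's dispatch loop (named so lemmas can cite it)
def pvStep (s : List String × List String × List String × List String × List String × List String)
    (j : String) : List String × List String × List String × List String × List String × List String :=
  let c := PySem.Str.pyGet? j 0
  if c == some '4' then (s.1 ++ [j], s.2.1, s.2.2.1, s.2.2.2.1, s.2.2.2.2.1, s.2.2.2.2.2)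
  else if c == some '5' then (s.1, s.2.1 ++ [j], s.2.2.1, s.2.2.2.1, s.2.2.2.2.1, s.2.2.2.2.2)
  else if c == some '6' then (s.1, s.2.1, s.2.2.1 ++ [j], s.2.2.2.1, s.2.2.2.2.1, s.2.2.2.2.2)
  else if c == some '7' then (s.1, s.2.1, s.2.2.1, s.2.2.2.1 ++ [j], s.2.2.2.2.1, s.2.2.2.2.2)
  else if c == some '8' then (s.1, s.2.1, s.2.2.1, s.2.2.2.1, s.2.2.2.2.1 ++ [j], s.2.2.2.2.2)
  else if c == some '9' then (s.1, s.2.1, s.2.2.1, s.2.2.2.1, s.2.2.2.2.1, s.2.2.2.2.2 ++ [j])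
  else s

def get_equipment_columns_alt (cols : List String) : List (Int × List String) :=
  let head := PySem.List.pyGetD cols 0 ""
  let bs := (PySem.List.slice cols (some 1) none).foldl pvStep ([], [], [], [], [], [])
  ((PySem.List.pyRange 4 10 1).zip
      [bs.1, bs.2.1, bs.2.2.1, bs.2.2.2.1, bs.2.2.2.2.1, bs.2.2.2.2.2]).map
    (fun p => (p.1, [head] ++ PySem.List.sorted p.2 (fun x => x) false))

-- ===== PRECONDITION & SPEC =====
-- Pre_ excludes exactly the inputs where the Python raises IndexError: empty cols
-- (cols[0]) and an empty string among cols[1:] (j[0]); B raises there too.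
def Pre_get_equipment_columns (cols : List String) : Prop :=
  cols ≠ [] ∧ ∀ j ∈ PySem.List.slice cols (some 1) none, j ≠ ""
instance (cols : List String) : Decidable (Pre_get_equipment_columns cols) := by
  unfold Pre_get_equipment_columns; infer_instance
def pvWitness_get_equipment_columns : List String := ["id", "4 Temp", "9z", "6a", "4b", "x"]
def Spec_get_equipment_columns (cols : List String) (out : List (Int × List String)) : Prop := out = get_equipment_columns_alt cols
instance (cols : List String) (out : List (Int × List String)) : Decidable (Spec_get_equipment_columns cols out) := by unfold Spec_get_equipment_columns; infer_instance

-- ===== CLAIM (what is proved, stated in full; the proofs are below) =====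
def Claim_equal_get_equipment_columns : Prop := ∀ (cols : List String), Dom_get_equipment_columns cols → Pre_get_equipment_columns cols → Spec_get_equipment_columns cols (get_equipment_columns cols)

-- ===== LEMMAS AND PROOFS =====

theorem pv_test_eq (c₀ : Char) (o : Option Char) :
    ((o.map (fun c => String.singleton c)) == some (String.singleton c₀)) = (o == some c₀) := by
  cases o with
  | none => rfl
  | some c =>
    by_cases h : c = c₀
    · subst h; simp
    · simp [String.singleton, String.ext_iff, h]

def pvP (c₀ : Char) (j : String) : Bool := PySem.Str.pyGet? j 0 == some c₀

theorem pvStep_eq (a4 a5 a6 a7 a8 a9 : List String) (j : String) :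
    pvStep (a4, a5, a6, a7, a8, a9) j =
      (a4 ++ if pvP '4' j then [j] else [], a5 ++ if pvP '5' j then [j] else [],
       a6 ++ if pvP '6' j then [j] else [], a7 ++ if pvP '7' j then [j] else [],
       a8 ++ if pvP '8' j then [j] else [], a9 ++ if pvP '9' j then [j] else []) := by
  cases hc : PySem.List.pyGet? j.toList 0 with
  | none => simp [pvStep, pvP, hc]
  | some c =>
    simp only [pvStep, pvP]
    by_cases h4 : c = '4'
    · simp [hc, h4]
    · by_cases h5 : c = '5'
      · simp [hc, h5]
      · by_cases h6 : c = '6'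
        · simp [hc, h6]
        · by_cases h7 : c = '7'
          · simp [hc, h7]
          · by_cases h8 : c = '8'
            · simp [hc, h8]
            · by_cases h9 : c = '9'
              · simp [hc, h9]
              · simp [hc, h4, h5, h6, h7, h8, h9]

theorem pv_bucket_fold (l : List String)
    (a4 a5 a6 a7 a8 a9 : List String) :
    l.foldl pvStep (a4, a5, a6, a7, a8, a9)
    = (a4 ++ l.filter (pvP '4'), a5 ++ l.filter (pvP '5'), a6 ++ l.filter (pvP '6'),
       a7 ++ l.filter (pvP '7'), a8 ++ l.filter (pvP '8'), a9 ++ l.filter (pvP '9')) := by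
  induction l generalizing a4 a5 a6 a7 a8 a9 with
  | nil => simp
  | cons j t ih =>
    rw [List.foldl_cons, pvStep_eq, ih]
    simp only [List.filter_cons, List.append_assoc]
    split_ifs <;> simp

-- ===== VERDICT (by name: the statement is the Claim_ definition above) =====
theorem get_equipment_columns_spec : Claim_equal_get_equipment_columns := by
  intro cols _ _
  show get_equipment_columns cols = get_equipment_columns_alt cols
  unfold get_equipment_columns get_equipment_columns_alt
  rw [(by decide : PySem.List.pyRange 4 10 1 = [4, 5, 6, 7, 8, 9])]
  rw [pv_bucket_fold]
  simp only [List.foldl_cons, List.foldl_nil, List.zip_cons_cons, List.zip_nil_right, List.map_cons,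
    List.map_nil]
  have hx : ∀ c₀ : Char, ∀ xs : List String,
      xs.foldl (fun acc j =>
        if (PySem.Str.pyGet? j 0).map (fun c => String.singleton c) == some (String.singleton c₀)
        then acc ++ [j] else acc) [] = xs.filter (pvP c₀) := by
    intro c₀ xs
    have := PySem.List.foldl_append_if_eq_filter
      (p := fun j => ((PySem.Str.pyGet? j 0).map (fun c => String.singleton c) == some (String.singleton c₀)))
      (l := xs) (acc := [])
    rw [this]
    simp only [List.nil_append]
    exact List.filter_congr (fun j _ => pv_test_eq c₀ (PySem.Str.pyGet? j 0))
  have h4 := hx '4' (PySem.List.slice cols (some 1) none)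
  have h5 := hx '5' (PySem.List.slice cols (some 1) none)
  have h6 := hx '6' (PySem.List.slice cols (some 1) none)
  have h7 := hx '7' (PySem.List.slice cols (some 1) none)
  have h8 := hx '8' (PySem.List.slice cols (some 1) none)
  have h9 := hx '9' (PySem.List.slice cols (some 1) none)
  simp only [show PySem.Int.toStr 4 = String.singleton '4' from by decide,
    show PySem.Int.toStr 5 = String.singleton '5' from by decide,
    show PySem.Int.toStr 6 = String.singleton '6' from by decide,
    show PySem.Int.toStr 7 = String.singleton '7' from by decide,
    show PySem.Int.toStr 8 = String.singleton '8' from by decide,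
    show PySem.Int.toStr 9 = String.singleton '9' from by decide] at *
  rw [h4, h5, h6, h7, h8, h9]
  simp [PySem.Dict.insert, PySem.Dict.getD, PySem.Dict.get?, PySem.Dict.empty, PySem.Dict.contains]
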